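-- pv_equiv track=rewrite | github.com/yuchandewar/Education | 686a8c5d5b2a00b1051e71af/AI/practical8.py | monkey_banana_bfs
-- ===== SOURCE A (Python) =====
-- from collections import deque
--
-- def is_goal(state):
--     _, _, _, has_banana = state
--     return has_banana
--
-- def get_successors(state):
--     monkey_pos, box_pos, on_box, has_banana = state
--     successors = []
--
--     if has_banana:
--         return []
--
--     if monkey_pos != box_pos and not on_box:
--         # Monkey moves to box
--         new_state = (box_pos, box_pos, False, False)
--         successors.append((new_state, "move_to_box"))
--
--     if monkey_pos == box_pos and not on_box:
--         # Monkey pushes box to banana (assume banana is at "middle")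
--         new_state = ("middle", "middle", False, False)
--         successors.append((new_state, "push_box_to_banana"))
--
--     if monkey_pos == "middle" and box_pos == "middle" and not on_box:
--         # Monkey climbs box
--         new_state = ("middle", "middle", True, False)
--         successors.append((new_state, "climb_box"))
--
--     if monkey_pos == "middle" and box_pos == "middle" and on_box:
--         # Monkey takes banana
--         new_state = ("middle", "middle", True, True)
--         successors.append((new_state, "take_banana"))
--
--     return successors
--
-- def monkey_banana_bfs(initial_state):
--     queue = deque()
--     queue.append((initial_state, []))
--     visited = set()
--
--     while queue:
--         state, path = queue.popleft()
--         if is_goal(state):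
--             return path
--
--         visited.add(state)
--
--         for new_state, action in get_successors(state):
--             if new_state not in visited:
--                 queue.append((new_state, path + [action]))
--
--     return None
-- ===== SOURCE B (Python) =====
-- def is_goal(state):
--     _, _, _, has_banana = state
--     return has_banana
--
-- def get_successors(state):
--     monkey_pos, box_pos, on_box, has_banana = state
--     successors = []
--
--     if has_banana:
--         return []
--
--     if monkey_pos != box_pos and not on_box:
--         new_state = (box_pos, box_pos, False, False)
--         successors.append((new_state, "move_to_box"))
--
--     if monkey_pos == box_pos and not on_box:
--         new_state = ("middle", "middle", False, False)
--         successors.append((new_state, "push_box_to_banana"))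
--
--     if monkey_pos == "middle" and box_pos == "middle" and not on_box:
--         new_state = ("middle", "middle", True, False)
--         successors.append((new_state, "climb_box"))
--
--     if monkey_pos == "middle" and box_pos == "middle" and on_box:
--         new_state = ("middle", "middle", True, True)
--         successors.append((new_state, "take_banana"))
--
--     return successors
--
-- def dfs(state, path, visited):
--     if is_goal(state):
--         return path
--     visited = visited | {state}
--     for new_state, action in get_successors(state):
--         if new_state not in visited:
--             result = dfs(new_state, path + [action], visited)
--             if result is not None:
--                 return result
--     return None
--
-- def monkey_banana_bfs(initial_state):
--     return dfs(initial_state, [], set())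
-- ===== Notes on version B (the rewrite author's own statement) =====
-- stated objective: alternative
-- what changed: Replaces the explicit FIFO deque frontier of BFS with a recursive depth-first search that threads the visited set through the recursion and returns the first successful path; equivalent here because the only branching state self-loops (pruned by visited), leaving a unique goal path.
import Mathlib
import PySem

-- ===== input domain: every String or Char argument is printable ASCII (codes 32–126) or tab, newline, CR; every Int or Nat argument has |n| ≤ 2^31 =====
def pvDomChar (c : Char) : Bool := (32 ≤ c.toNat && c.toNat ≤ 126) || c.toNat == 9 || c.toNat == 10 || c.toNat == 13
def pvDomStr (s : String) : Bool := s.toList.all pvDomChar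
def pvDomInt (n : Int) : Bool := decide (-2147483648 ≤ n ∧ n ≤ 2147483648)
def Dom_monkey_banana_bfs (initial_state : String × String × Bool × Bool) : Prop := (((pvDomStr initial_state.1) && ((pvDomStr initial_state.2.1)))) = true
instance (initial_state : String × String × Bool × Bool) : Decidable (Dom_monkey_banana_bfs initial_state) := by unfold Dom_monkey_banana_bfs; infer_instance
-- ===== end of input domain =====

-- B replaces A's explicit FIFO frontier by a recursive depth-first search threading the
-- visited set through the recursion (objective: alternative decomposition, same cost).

-- ===== PORT A =====
def pvIsGoal (state : String × String × Bool × Bool) : Bool := state.2.2.2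

def pvSuccessors (state : String × String × Bool × Bool) :
    List ((String × String × Bool × Bool) × String) :=
  match state with
  | (monkey_pos, box_pos, on_box, has_banana) =>
    if has_banana then []
    else
      let successors : List ((String × String × Bool × Bool) × String) := []
      let successors := if monkey_pos != box_pos && !on_box then
        successors ++ [((box_pos, box_pos, false, false), "move_to_box")] else successors
      let successors := if monkey_pos == box_pos && !on_box then
        successors ++ [(("middle", "middle", false, false), "push_box_to_banana")] else successors
      let successors := if monkey_pos == "middle" && box_pos == "middle" && !on_box then
        successors ++ [(("middle", "middle", true, false), "climb_box")] else successors
      let successors := if monkey_pos == "middle" && box_pos == "middle" && on_box then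
        successors ++ [(("middle", "middle", true, true), "take_banana")] else successors
      successors

-- A's while-loop over the deque, with a fuel bound that merely makes the loop total
-- (20 steps is more than the loop can ever take: at most 5 distinct states are reachable).
def pvBfsLoop : Nat → List ((String × String × Bool × Bool) × List String) →
    PySem.Set (String × String × Bool × Bool) → Option (List String)
  | 0, _, _ => none
  | _ + 1, [], _ => none
  | fuel + 1, (state, path) :: rest, visited =>
    if pvIsGoal state then some path
    else
      let visited := PySem.Set.add visited state
      pvBfsLoop fuel
        (rest ++ ((pvSuccessors state).filter
            (fun p => !(PySem.Set.contains visited p.1))).map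
            (fun p => (p.1, path ++ [p.2])))
        visited

def monkey_banana_bfs (initial_state : String × String × Bool × Bool) : Option (List String) :=
  pvBfsLoop 20 [(initial_state, [])] PySem.Set.empty

-- ===== PORT B =====
-- B's recursive dfs, with the same kind of fuel bound (recursion depth is at most 5).
mutual
def pvDfs : Nat → (String × String × Bool × Bool) → List String →
    PySem.Set (String × String × Bool × Bool) → Option (List String)
  | 0, _, _, _ => none
  | fuel + 1, state, path, visited =>
    if pvIsGoal state then some path
    else
      pvDfsChildren fuel (pvSuccessors state) path (PySem.Set.add visited state)
  termination_by fuel _ _ _ => (fuel, 0)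

def pvDfsChildren : Nat → List ((String × String × Bool × Bool) × String) → List String →
    PySem.Set (String × String × Bool × Bool) → Option (List String)
  | _, [], _, _ => none
  | fuel, (new_state, action) :: rest, path, visited =>
    if PySem.Set.contains visited new_state then pvDfsChildren fuel rest path visited
    else
      match pvDfs fuel new_state (path ++ [action]) visited with
      | some r => some r
      | none => pvDfsChildren fuel rest path visited
  termination_by fuel l _ _ => (fuel, l.length + 1)
end

def monkey_banana_bfs_alt (initial_state : String × String × Bool × Bool) : Option (List String) :=
  pvDfs 20 initial_state [] PySem.Set.empty

-- ===== PRECONDITION & SPEC =====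
def Spec_monkey_banana_bfs (initial_state : String × String × Bool × Bool) (out : Option (List String)) : Prop := out = monkey_banana_bfs_alt initial_state
instance (initial_state : String × String × Bool × Bool) (out : Option (List String)) : Decidable (Spec_monkey_banana_bfs initial_state out) := by unfold Spec_monkey_banana_bfs; infer_instance

-- ===== CLAIM (what is proved, stated in full; the proofs are below) =====
def Claim_equal_monkey_banana_bfs : Prop := ∀ (initial_state : String × String × Bool × Bool), Dom_monkey_banana_bfs initial_state → Spec_monkey_banana_bfs initial_state (monkey_banana_bfs initial_state)

-- ===== LEMMAS AND PROOFS =====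

-- ===== VERDICT (by name: the statement is the Claim_ definition above) =====
theorem monkey_banana_bfs_spec : Claim_equal_monkey_banana_bfs := by
  rintro ⟨m, b, on, has⟩ _
  unfold Spec_monkey_banana_bfs monkey_banana_bfs monkey_banana_bfs_alt
  cases has <;> cases on <;>
    by_cases hmb : m = b <;> by_cases hm : m = "middle" <;> by_cases hb : b = "middle" <;>
    first
    | (exact absurd (hm.trans hb.symm) hmb)
    | (exact absurd (hmb.symm.trans hm) hb)
    | (exact absurd (hmb.trans hb) hm)
    | (try subst hmb
       try subst hm
       try subst hb
       try have hmb' := Ne.symm hmb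
       try have hm' := Ne.symm hm
       try have hb' := Ne.symm hb
       simp_all [pvBfsLoop, pvDfs, pvDfsChildren, pvIsGoal, pvSuccessors,
         PySem.Set.add, PySem.Set.contains, PySem.Set.empty])
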